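-- pv_equiv track=rewrite | github.com/jonnymortemore/Bytes | app.py | split_dictionary
-- ===== SOURCE A (Python) =====
-- def split_dictionary(input_dict, start, end):
--     new_dict = {}
--     i = 0
--     for k, v in input_dict.items():
--         i += 1
--         if i >= start and i <= end:
--             new_dict[k] = v
--
--     return new_dict
-- ===== SOURCE B (Python) =====
-- def split_dictionary(input_dict, start, end):
--     lo = max(start - 1, 0)
--     hi = max(end, 0)
--     return dict(list(input_dict.items())[lo:hi])
-- ===== Notes on version B (the rewrite author's own statement) =====
-- stated objective: simpler
-- what changed: Replaces the counting loop with conditional insertion by a single positional slice of the items list (lo = max(start-1,0), hi = max(end,0)).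
import Mathlib
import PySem

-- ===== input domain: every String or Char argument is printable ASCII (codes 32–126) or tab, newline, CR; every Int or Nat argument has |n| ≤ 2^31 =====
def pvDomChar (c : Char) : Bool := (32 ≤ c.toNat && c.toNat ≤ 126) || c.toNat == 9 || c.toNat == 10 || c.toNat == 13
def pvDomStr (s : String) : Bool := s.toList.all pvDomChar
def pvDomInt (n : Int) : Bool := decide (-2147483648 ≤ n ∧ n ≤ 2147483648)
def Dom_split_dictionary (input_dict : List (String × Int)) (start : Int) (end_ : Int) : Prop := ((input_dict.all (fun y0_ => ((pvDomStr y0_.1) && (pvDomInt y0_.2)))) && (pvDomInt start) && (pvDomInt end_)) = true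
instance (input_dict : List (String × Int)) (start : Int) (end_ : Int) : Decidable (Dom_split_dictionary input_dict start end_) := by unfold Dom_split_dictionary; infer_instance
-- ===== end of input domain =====

-- B replaces A's counting loop with one positional slice of the items list (objective: simpler).


-- ===== PORT A =====
-- A: loop over the items with a 1-based counter i, keeping (k, v) when start ≤ i ≤ end.
-- (A dict has distinct keys, so 'new_dict[k] = v' appends in insertion order.)
def split_dictionary (input_dict : List (String × Int)) (start : Int) (end_ : Int) : List (String × Int) :=
  (input_dict.foldl
    (fun (st : List (String × Int) × Int) kv =>
      let i := st.2 + 1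
      (if start ≤ i ∧ i ≤ end_ then st.1 ++ [kv] else st.1, i))
    ([], 0)).1

-- ===== PORT B =====
-- B: one positional slice items[max(start-1,0) : max(end,0)].
def split_dictionary_alt (input_dict : List (String × Int)) (start : Int) (end_ : Int) : List (String × Int) :=
  PySem.List.slice input_dict (some (max (start - 1) 0)) (some (max end_ 0))

-- ===== PRECONDITION & SPEC =====
def Spec_split_dictionary (input_dict : List (String × Int)) (start : Int) (end_ : Int) (out : List (String × Int)) : Prop := out = split_dictionary_alt input_dict start end_
instance (input_dict : List (String × Int)) (start : Int) (end_ : Int) (out : List (String × Int)) : Decidable (Spec_split_dictionary input_dict start end_ out) := by unfold Spec_split_dictionary; infer_instance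

-- ===== CLAIM (what is proved, stated in full; the proofs are below) =====
def Claim_equal_split_dictionary : Prop := ∀ (input_dict : List (String × Int)) (start : Int) (end_ : Int), Dom_split_dictionary input_dict start end_ → Spec_split_dictionary input_dict start end_ (split_dictionary input_dict start end_)

-- ===== LEMMAS AND PROOFS =====

-- the elements A's loop keeps, starting from counter value i (no accumulator)
def pvWin (start end_ : Int) : List (String × Int) → Int → List (String × Int)
  | [], _ => []
  | kv :: t, i =>
      if start ≤ i + 1 ∧ i + 1 ≤ end_ then kv :: pvWin start end_ t (i + 1)
      else pvWin start end_ t (i + 1)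

theorem pvFold_eq_win (start end_ : Int) :
    ∀ (xs : List (String × Int)) (acc : List (String × Int)) (i : Int),
      (xs.foldl
        (fun (st : List (String × Int) × Int) kv =>
          let j := st.2 + 1
          (if start ≤ j ∧ j ≤ end_ then st.1 ++ [kv] else st.1, j))
        (acc, i)).1 = acc ++ pvWin start end_ xs i := by
  intro xs
  induction xs with
  | nil => intro acc i; simp [pvWin]
  | cons kv t ih =>
      intro acc i
      simp only [List.foldl, pvWin]
      split_ifs with h
      · rw [ih]; simp
      · rw [ih]

theorem pvWin_eq_drop_take (start end_ : Int) :
    ∀ (xs : List (String × Int)) (i : Int),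
      pvWin start end_ xs i =
        (xs.drop (start - 1 - i).toNat).take ((end_ - i).toNat - (start - 1 - i).toNat) := by
  intro xs
  induction xs with
  | nil => intro i; simp [pvWin]
  | cons kv t ih =>
      intro i
      simp only [pvWin]
      split_ifs with h
      · -- start ≤ i+1 ≤ end_ : keep kv
        have ha : (start - 1 - i).toNat = 0 := by omega
        have ha' : (start - 1 - (i + 1)).toNat = 0 := by omega
        have hb : (end_ - i).toNat = (end_ - (i + 1)).toNat + 1 := by omega
        rw [ih, ha, ha', hb]
        simp [List.take_succ_cons]
      · rcases not_and_or.mp h with h1 | h2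
        · -- i+1 < start : skip kv, shift the drop
          have ha : (start - 1 - i).toNat = (start - 1 - (i + 1)).toNat + 1 := by omega
          have hk : (end_ - i).toNat - ((start - 1 - (i + 1)).toNat + 1)
              = (end_ - (i + 1)).toNat - (start - 1 - (i + 1)).toNat := by omega
          rw [ih, ha, hk]
          simp [List.drop_succ_cons]
        · -- end_ < i+1 : nothing more is kept, both sides empty
          have hb : (end_ - i).toNat - (start - 1 - i).toNat = 0 := by omega
          have hb' : (end_ - (i + 1)).toNat - (start - 1 - (i + 1)).toNat = 0 := by omega
          rw [ih, hb, hb']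
          simp

-- ===== VERDICT (by name: the statement is the Claim_ definition above) =====
theorem split_dictionary_spec : Claim_equal_split_dictionary := by
  intro xs start end_ _
  show split_dictionary xs start end_ = split_dictionary_alt xs start end_
  unfold split_dictionary split_dictionary_alt
  rw [pvFold_eq_win, pvWin_eq_drop_take, PySem.List.slice_toNat]
  · have h1 : (max (start - 1) 0).toNat = (start - 1 - 0).toNat := by omega
    have h2 : (max end_ 0).toNat = (end_ - 0).toNat := by omega
    rw [h1, h2]
    simp
  · omega
  · omega
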